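-- pv_equiv track=rewrite | github.com/cohpy/challenge-201602-leapday | answer12.py | cohpy_leap_day
-- ===== SOURCE A (Python) =====
-- from itertools import count
--
-- def isleap(year):
--     return year % 4 == 0 and (year % 100 != 0 or year % 400 == 0)
--
-- def cohpy_leap_day(leap_year=2016):
--     if not isleap(leap_year):
--         raise ValueError('year is not a valid leap year')
--     days = 0
--     for year in count(leap_year + 4, 4):
--         days += 4 * 365 + isleap(year)
--         if days % 7 == 0:
--             return year
-- ===== SOURCE B (Python) =====
-- def isleap(year):
--     return year % 4 == 0 and (year % 100 != 0 or year % 400 == 0)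
--
-- def _feb29_weekday(year):
--     # weekday index of Feb 29 of a leap year, from the Gregorian ordinal (mod 7)
--     return (365 * year + year // 4 - year // 100 + year // 400 + 59) % 7
--
-- def cohpy_leap_day(leap_year=2016):
--     if not isleap(leap_year):
--         raise ValueError('year is not a valid leap year')
--     target = _feb29_weekday(leap_year)
--     year = leap_year + 4
--     while not (isleap(year) and _feb29_weekday(year) == target):
--         year += 4
--     return year
-- ===== Notes on version B (the rewrite author's own statement) =====
-- stated objective: alternative
-- what changed: B derives each candidate's Feb-29 weekday directly from a closed-form Gregorian day-number formula and skips non-leap century years, instead of A's running day-count accumulator that also tests skipped non-leap years.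
-- intended difference: When leap_year+12 is a non-leap century year (e.g. 1888), A returns that non-leap year leap_year+12 (which has no Feb 29, so it cannot be the answer), while B returns leap_year+40, the first actual leap year whose Feb 29 falls on the same weekday — B's value is the intended one. — e.g. on cohpy_leap_day(1888): A returns 1900, B returns 1928
import Mathlib
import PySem

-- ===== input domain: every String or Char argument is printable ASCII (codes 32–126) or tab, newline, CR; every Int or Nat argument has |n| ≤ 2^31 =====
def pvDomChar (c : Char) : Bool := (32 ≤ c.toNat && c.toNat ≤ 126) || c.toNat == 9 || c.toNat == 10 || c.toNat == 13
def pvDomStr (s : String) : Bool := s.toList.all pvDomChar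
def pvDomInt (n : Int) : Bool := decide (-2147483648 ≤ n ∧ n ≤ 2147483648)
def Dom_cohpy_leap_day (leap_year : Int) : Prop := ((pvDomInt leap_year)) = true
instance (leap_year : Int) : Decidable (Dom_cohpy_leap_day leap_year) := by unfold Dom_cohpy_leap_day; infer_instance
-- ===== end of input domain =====

-- B replaces A's running day-count accumulator by a closed-form Feb-29 weekday formula and
-- skips non-leap century years; A = B except when leap_year+12 is a non-leap century (see D_ below).

-- ===== PORT A =====
-- shared helper: Python's isleap (the '%' divisors are positive literals, so Int.emod is exact)
def pyIsLeap (year : Int) : Bool := year % 4 == 0 && (year % 100 != 0 || year % 400 == 0)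

-- A's 'for year in count(leap_year+4, 4)' loop, fuel-bounded (fuel only makes it total:
-- the Python loop always returns within 700 steps, since after 2800 years days is a multiple of 7)
def loopA : Nat → Int → Int → Option Int
  | 0, _, _ => none
  | f + 1, year, days =>
    let days' := days + 4 * 365 + (if pyIsLeap year then 1 else 0)
    if days' % 7 == 0 then some year else loopA f (year + 4) days'

def cohpy_leap_day (leap_year : Int) : Int :=
  if ¬ pyIsLeap leap_year then 0   -- Python raises ValueError here; excluded by Pre_
  else (loopA 700 (leap_year + 4) 0).getD 0

-- ===== PORT B =====
def feb29wd (year : Int) : Int :=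
  PySem.Int.mod (365 * year + PySem.Int.floordiv year 4 - PySem.Int.floordiv year 100
    + PySem.Int.floordiv year 400 + 59) 7

-- B's 'while not (isleap(year) and _feb29_weekday(year) == target)' loop, fuel-bounded likewise
def loopB : Nat → Int → Int → Option Int
  | 0, _, _ => none
  | f + 1, target, year =>
    if pyIsLeap year && feb29wd year == target then some year else loopB f target (year + 4)

def cohpy_leap_day_alt (leap_year : Int) : Int :=
  if ¬ pyIsLeap leap_year then 0   -- Python raises ValueError here; excluded by Pre_
  else (loopB 700 (feb29wd leap_year) (leap_year + 4)).getD 0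

-- ===== PRECONDITION & SPEC =====
-- Pre_ excludes exactly the non-leap inputs, on which Python A raises ValueError.
def Pre_cohpy_leap_day (leap_year : Int) : Prop :=
  leap_year % 4 = 0 ∧ (leap_year % 100 ≠ 0 ∨ leap_year % 400 = 0)
instance (leap_year : Int) : Decidable (Pre_cohpy_leap_day leap_year) := by
  unfold Pre_cohpy_leap_day; infer_instance

def pvWitness_cohpy_leap_day : Int := 2016

-- When leap_year+12 is a non-leap century year, A returns leap_year+12 — a year with no Feb 29,
-- so it cannot be the next leap year with the same Feb-29 weekday — while B returns leap_year+40,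
-- the first actual leap year whose Feb 29 falls on the same weekday; B's value is the intended one.
def D_cohpy_leap_day (leap_year : Int) : Prop :=
  (leap_year + 12) % 100 = 0 ∧ (leap_year + 12) % 400 ≠ 0
instance (leap_year : Int) : Decidable (D_cohpy_leap_day leap_year) := by
  unfold D_cohpy_leap_day; infer_instance

def Spec_cohpy_leap_day (leap_year : Int) (out : Int) : Prop :=
  ¬ D_cohpy_leap_day leap_year → out = cohpy_leap_day_alt leap_year
instance (leap_year : Int) (out : Int) : Decidable (Spec_cohpy_leap_day leap_year out) := by
  unfold Spec_cohpy_leap_day; infer_instance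

def pvDiffWitness_cohpy_leap_day : Int := 1888
def pvDiffWitnessOut_cohpy_leap_day : Int × Int := (1900, 1928)

-- ===== CLAIM (what is proved, stated in full; the proofs are below) =====
def Claim_unchanged_cohpy_leap_day : Prop := ∀ (leap_year : Int), Dom_cohpy_leap_day leap_year → Pre_cohpy_leap_day leap_year → Spec_cohpy_leap_day leap_year (cohpy_leap_day leap_year)
def Claim_changed_cohpy_leap_day : Prop := Dom_cohpy_leap_day (pvDiffWitness_cohpy_leap_day) ∧ Pre_cohpy_leap_day (pvDiffWitness_cohpy_leap_day) ∧ D_cohpy_leap_day (pvDiffWitness_cohpy_leap_day) ∧ cohpy_leap_day (pvDiffWitness_cohpy_leap_day) = pvDiffWitnessOut_cohpy_leap_day.1 ∧ cohpy_leap_day_alt (pvDiffWitness_cohpy_leap_day) = pvDiffWitnessOut_cohpy_leap_day.2 ∧ pvDiffWitnessOut_cohpy_leap_day.1 ≠ pvDiffWitnessOut_cohpy_leap_day.2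
def Claim_exact_cohpy_leap_day : Prop := ∀ (leap_year : Int), Dom_cohpy_leap_day leap_year → Pre_cohpy_leap_day leap_year → D_cohpy_leap_day leap_year → cohpy_leap_day leap_year ≠ cohpy_leap_day_alt leap_year

-- ===== LEMMAS AND PROOFS =====

-- leapness only depends on the year mod 400
lemma pyIsLeap_congr (y y' : Int) (h : y % 400 = y' % 400) : pyIsLeap y = pyIsLeap y' := by
  have h4 : y % 4 = y' % 4 := by omega
  have h100 : y % 100 = y' % 100 := by omega
  simp [pyIsLeap, h4, h100, h]

-- the weekday formula only depends on the year mod 400 (146097 days per 400 years ≡ 0 mod 7)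
lemma feb29wd_congr (y y' : Int) (h : y % 400 = y' % 400) : feb29wd y = feb29wd y' := by
  obtain ⟨k, hk⟩ : ∃ k, y = y' + 400 * k := ⟨(y - y') / 400, by omega⟩
  unfold feb29wd
  rw [PySem.Int.mod_eq_emod_of_pos (by norm_num), PySem.Int.mod_eq_emod_of_pos (by norm_num),
      PySem.Int.floordiv_eq_ediv_of_pos (a := y) (b := 4) (by norm_num),
      PySem.Int.floordiv_eq_ediv_of_pos (a := y) (b := 100) (by norm_num),
      PySem.Int.floordiv_eq_ediv_of_pos (a := y) (b := 400) (by norm_num),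
      PySem.Int.floordiv_eq_ediv_of_pos (a := y') (b := 4) (by norm_num),
      PySem.Int.floordiv_eq_ediv_of_pos (a := y') (b := 100) (by norm_num),
      PySem.Int.floordiv_eq_ediv_of_pos (a := y') (b := 400) (by norm_num)]
  subst hk
  have h4 : (y' + 400 * k) / 4 = y' / 4 + 100 * k := by omega
  have h100 : (y' + 400 * k) / 100 = y' / 100 + 4 * k := by omega
  have h400 : (y' + 400 * k) / 400 = y' / 400 + k := by omega
  rw [h4, h100, h400]
  omega

-- shifting the start year by a multiple of 400 shifts A's loop result by the same amount
lemma loopA_shift (f : Nat) : ∀ (y y' d : Int), y % 400 = y' % 400 →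
    loopA f y d = (loopA f y' d).map (· + (y - y')) := by
  induction f with
  | zero => intro y y' d h; simp [loopA]
  | succ n ih =>
    intro y y' d h
    have e : y + 4 - (y' + 4) = y - y' := by ring
    simp only [loopA, pyIsLeap_congr y y' h]
    split <;>
    · rw [ih (y + 4) (y' + 4) _ (by omega), e]
      split
      · simp
      · rfl

-- same for B's loop (the target is held fixed)
lemma loopB_shift (f : Nat) : ∀ (t y y' : Int), y % 400 = y' % 400 →
    loopB f t y = (loopB f t y').map (· + (y - y')) := by
  induction f with
  | zero => intro t y y' h; simp [loopB]
  | succ n ih =>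
    intro t y y' h
    have e : y + 4 - (y' + 4) = y - y' := by ring
    simp only [loopB, pyIsLeap_congr y y' h, feb29wd_congr y y' h]
    rw [ih t (y + 4) (y' + 4) (by omega), e]
    split
    · simp
    · rfl

-- the per-residue facts, checked by computation over the 400 residues mod 400
set_option maxRecDepth 20000 in
lemma residue_facts : ∀ r : Fin 400,
    pyIsLeap (r : Int) = true →
    ((¬ (((r : Int) + 12) % 100 = 0 ∧ ((r : Int) + 12) % 400 ≠ 0) →
        loopA 700 ((r : Int) + 4) 0 = loopB 700 (feb29wd (r : Int)) ((r : Int) + 4)) ∧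
     ((((r : Int) + 12) % 100 = 0 ∧ ((r : Int) + 12) % 400 ≠ 0) →
        loopA 700 ((r : Int) + 4) 0 = some ((r : Int) + 12) ∧
        loopB 700 (feb29wd (r : Int)) ((r : Int) + 4) = some ((r : Int) + 40))) := by
  decide

-- reduce an arbitrary input to its residue mod 400
lemma reduce (L : Int) (hpre : Pre_cohpy_leap_day L) :
    ∃ r : Fin 400, L % 400 = (r : Int) ∧ pyIsLeap (r : Int) = true ∧
      cohpy_leap_day L = ((loopA 700 ((r : Int) + 4) 0).map (· + (L - (r : Int)))).getD 0 ∧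
      cohpy_leap_day_alt L =
        ((loopB 700 (feb29wd (r : Int)) ((r : Int) + 4)).map (· + (L - (r : Int)))).getD 0 := by
  obtain ⟨h4, hor⟩ : L % 4 = 0 ∧ (L % 100 ≠ 0 ∨ L % 400 = 0) := hpre
  have hr0 : 0 ≤ L % 400 := Int.emod_nonneg L (by norm_num)
  have hr1 : L % 400 < 400 := Int.emod_lt_of_pos L (by norm_num)
  have hL : pyIsLeap L = true := by simp [pyIsLeap]; omega
  have hcast : ((Fin.mk (L % 400).toNat (by omega) : Fin 400) : Int) = L % 400 := by
    simp; omega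
  refine ⟨⟨(L % 400).toNat, by omega⟩, ?_, ?_, ?_, ?_⟩
  · rw [hcast]
  · rw [hcast, ← pyIsLeap_congr L (L % 400) (by omega)]; exact hL
  · rw [hcast]
    unfold cohpy_leap_day
    rw [if_neg (by simp [hL]), loopA_shift 700 (L + 4) (L % 400 + 4) 0 (by omega),
        show L + 4 - (L % 400 + 4) = L - L % 400 by ring]
  · rw [hcast]
    unfold cohpy_leap_day_alt
    rw [if_neg (by simp [hL]), loopB_shift 700 (feb29wd L) (L + 4) (L % 400 + 4) (by omega),
        show L + 4 - (L % 400 + 4) = L - L % 400 by ring,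
        feb29wd_congr L (L % 400) (by omega)]

-- D_ only depends on the residue mod 400
lemma D_congr (L : Int) (r : Fin 400) (h : L % 400 = (r : Int)) :
    D_cohpy_leap_day L ↔ (((r : Int) + 12) % 100 = 0 ∧ ((r : Int) + 12) % 400 ≠ 0) := by
  unfold D_cohpy_leap_day
  constructor <;> intro ⟨h1, h2⟩ <;> exact ⟨by omega, by omega⟩

-- ===== VERDICT (by name: the statement is the Claim_ definition above) =====
theorem cohpy_leap_day_spec : Claim_unchanged_cohpy_leap_day := by
  intro L _ hpre hnd
  obtain ⟨r, hr, hleap, hA, hB⟩ := reduce L hpre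
  rw [hA, hB, (residue_facts r hleap).1 (fun hd => hnd ((D_congr L r hr).2 hd))]

theorem cohpy_leap_day_changed : Claim_changed_cohpy_leap_day := by
  unfold Claim_changed_cohpy_leap_day; decide

theorem cohpy_leap_day_tight : Claim_exact_cohpy_leap_day := by
  intro L _ hpre hd
  obtain ⟨r, hr, hleap, hA, hB⟩ := reduce L hpre
  obtain ⟨ha, hb⟩ := (residue_facts r hleap).2 ((D_congr L r hr).1 hd)
  rw [hA, hB, ha, hb]
  simp only [Option.map_some, Option.getD_some]
  omega
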